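-- pv_equiv track=rewrite | github.com/wan-catherine/Leetcode | problems/N2354_Number_Of_Excellent_Pairs.py | countExcellentPairs_20250214
-- ===== SOURCE A (Python) =====
-- import bisect
-- import collections
-- from typing import List
--
-- def countExcellentPairs_20250214(nums: List[int], k: int) -> int:
--     ct = collections.Counter(nums)
--     nums = ct.keys()
--     arr = []
--     length = len(nums)
--     for n in nums:
--         bisect.insort_left(arr, bin(n).count('1'))
--     res = 0
--     j = length - 1
--     for i in range(length):
--         while j >=0 and arr[i] + arr[j] >= k:
--             j -= 1
--
--         if j < i:
--             res += 1 + (length - i - 1) * 2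
--         elif j == i:
--             res += (length - i - 1) * 2
--         else:
--             res += (length - j - 1) * 2
--     return res
-- ===== SOURCE B (Python) =====
-- from typing import List
--
-- def countExcellentPairs_20250214(nums: List[int], k: int) -> int:
--     # Bucket the distinct values by popcount (popcounts are tiny), then
--     # combine bucket sizes pairwise: no sorting, no per-element scan.
--     freq = {}
--     for v in dict.fromkeys(nums):
--         c = bin(v).count('1')
--         freq[c] = freq.get(c, 0) + 1
--     res = 0
--     for c1, f1 in freq.items():
--         for c2, f2 in freq.items():
--             if c1 + c2 >= k:
--                 res += f1 * f2
--     return res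
-- ===== Notes on version B (the rewrite author's own statement) =====
-- stated objective: faster
-- what changed: Replaces repeated bisect.insort into a sorted array plus a stateful two-pointer sweep with branch arithmetic by bucketing the distinct values by popcount in one dict pass and summing f1*f2 over the (at most 33x33) popcount-bucket pairs with c1+c2>=k.
import Mathlib
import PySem

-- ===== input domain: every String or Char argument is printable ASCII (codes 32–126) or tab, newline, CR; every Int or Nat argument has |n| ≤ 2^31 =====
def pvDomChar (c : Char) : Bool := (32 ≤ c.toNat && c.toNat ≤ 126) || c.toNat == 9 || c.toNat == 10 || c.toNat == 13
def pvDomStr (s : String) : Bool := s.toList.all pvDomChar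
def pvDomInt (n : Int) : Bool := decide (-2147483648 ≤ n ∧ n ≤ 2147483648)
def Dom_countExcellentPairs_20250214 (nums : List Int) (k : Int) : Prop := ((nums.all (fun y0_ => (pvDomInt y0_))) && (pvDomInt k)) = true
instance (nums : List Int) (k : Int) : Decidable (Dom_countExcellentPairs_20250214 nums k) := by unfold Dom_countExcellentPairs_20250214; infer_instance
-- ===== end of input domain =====

-- ===== PORT A =====
-- A = insort popcounts of the distinct values into a sorted array, then a stateful
-- two-pointer sweep with doubling branch arithmetic.  Equivalence is about the return value.
-- bin(n).count('1') for an int n = popcount of |n| = PySem.Int.bitCount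
def pvPc (n : Int) : Int := (PySem.Int.bitCount n : Int)

-- bisect.insort_left(a, x)  =  a.insert(bisect.bisect_left(a, x), x)   (exact)
def pvInsort (a : List Int) (x : Int) : List Int :=
  PySem.List.insert a ((PySem.List.bisectLeft a x : Nat) : Int) x

-- 'while j >= 0 and arr[i] + arr[j] >= k: j -= 1'.  arr[j] is ported as pyGetD arr j 0:
-- on every reachable call 0 <= j < arr.length, where pyGetD equals Python's arr[j].
def pvAWhile (arr : List Int) (k ai : Int) (j : Int) : Int :=
  if h : 0 ≤ j ∧ k ≤ ai + PySem.List.pyGetD arr j 0 then pvAWhile arr k ai (j - 1) else j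
termination_by (j + 1).toNat
decreasing_by omega

-- one iteration of the 'for i in range(length)' loop body (s = (res, j) state)
def pvStep (arr : List Int) (k length : Int) (s : Int × Int) (i : Int) : Int × Int :=
  let j := pvAWhile arr k (PySem.List.pyGetD arr i 0) s.2
  if j < i then (s.1 + (1 + (length - i - 1) * 2), j)
  else if j = i then (s.1 + (length - i - 1) * 2, j)
  else (s.1 + (length - j - 1) * 2, j)

def countExcellentPairs_20250214 (nums : List Int) (k : Int) : Int :=
  let ct := PySem.Dict.counter nums
  let ks := ct.keys
  let arr := ks.foldl (fun a n => pvInsort a (pvPc n)) []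
  let length : Int := (ks.length : Int)
  let st := (PySem.List.pyRange 0 length 1).foldl (pvStep arr k length) (0, length - 1)
  st.1

-- ===== PORT B =====
-- B = bucket the distinct values by popcount in one dict pass, then sum f1*f2 over
-- pairs of buckets whose popcounts add to at least k.
def countExcellentPairs_20250214_alt (nums : List Int) (k : Int) : Int :=
  let freq := (PySem.List.dedup nums).foldl
    (fun (d : PySem.Dict Int Int) v => d.insert (pvPc v) (d.getD (pvPc v) 0 + 1))
    PySem.Dict.empty
  freq.items.foldl (fun res p =>
    freq.items.foldl (fun res q =>
      if k ≤ p.1 + q.1 then res + p.2 * q.2 else res) res) 0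

-- ===== PRECONDITION & SPEC =====
def Spec_countExcellentPairs_20250214 (nums : List Int) (k : Int) (out : Int) : Prop := out = countExcellentPairs_20250214_alt nums k
instance (nums : List Int) (k : Int) (out : Int) : Decidable (Spec_countExcellentPairs_20250214 nums k out) := by unfold Spec_countExcellentPairs_20250214; infer_instance

-- ===== CLAIM (what is proved, stated in full; the proofs are below) =====
def Claim_equal_countExcellentPairs_20250214 : Prop := ∀ (nums : List Int) (k : Int), Dom_countExcellentPairs_20250214 nums k → Spec_countExcellentPairs_20250214 nums k (countExcellentPairs_20250214 nums k)

-- ===== LEMMAS AND PROOFS =====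

lemma pvInsort_sorted_perm (a : List Int) (x : Int) (hs : a.Pairwise (· ≤ ·)) :
    (pvInsort a x).Pairwise (· ≤ ·) ∧ (pvInsort a x).Perm (x :: a) := by
  obtain ⟨hle, hlt, hge⟩ := PySem.List.bisectLeft_spec a x hs
  rw [pvInsort, PySem.List.insert_natCast a _ x hle]
  have htake : ∀ y ∈ a.take (PySem.List.bisectLeft a x), y ≤ x := by
    intro y hy
    rw [List.mem_iff_getElem] at hy
    obtain ⟨j, hj, rfl⟩ := hy
    have hj' : j < a.length := by simp at hj; omega
    rw [List.getElem_take]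
    exact le_of_lt (hlt j hj' (by simp at hj; omega))
  have hdrop : ∀ y ∈ a.drop (PySem.List.bisectLeft a x), x ≤ y := by
    intro y hy
    rw [List.mem_iff_getElem] at hy
    obtain ⟨j, hj, rfl⟩ := hy
    rw [List.getElem_drop]
    exact hge _ _ (by omega)
  constructor
  · rw [List.pairwise_append]
    refine ⟨hs.sublist (List.take_sublist _ _), ?_, ?_⟩
    · rw [List.pairwise_cons]
      exact ⟨hdrop, hs.sublist (List.drop_sublist _ _)⟩
    · intro u hu v hv
      rcases List.mem_cons.mp hv with rfl | hv
      · exact htake u hu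
      · exact le_trans (htake u hu) (hdrop v hv)
  · have h1 : (List.take (PySem.List.bisectLeft a x) a ++ x :: List.drop (PySem.List.bisectLeft a x) a).Perm
        (x :: (List.take (PySem.List.bisectLeft a x) a ++ List.drop (PySem.List.bisectLeft a x) a)) :=
      List.perm_middle
    rw [List.take_append_drop] at h1
    exact h1

lemma pvInsortFold (l a : List Int) (hs : a.Pairwise (· ≤ ·)) :
    (l.foldl (fun acc x => pvInsort acc x) a).Pairwise (· ≤ ·) ∧
      (l.foldl (fun acc x => pvInsort acc x) a).Perm (a ++ l) := by
  induction l generalizing a with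
  | nil => simpa using hs
  | cons x t ih =>
    obtain ⟨h1, h2⟩ := pvInsort_sorted_perm a x hs
    obtain ⟨g1, g2⟩ := ih (pvInsort a x) h1
    refine ⟨g1, g2.trans ((h2.append_right t).trans ?_)⟩
    exact List.perm_middle.symm

lemma pvCountP_of_sorted (arr : List Int) (hs : arr.Pairwise (· ≤ ·)) (t : Int) :
    arr.countP (fun y => decide (t ≤ y)) = arr.length - PySem.List.bisectLeft arr t := by
  obtain ⟨hle, hlt, hge⟩ := PySem.List.bisectLeft_spec arr t hs
  conv_lhs => rw [← List.take_append_drop (PySem.List.bisectLeft arr t) arr]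
  rw [List.countP_append]
  have h1 : (List.take (PySem.List.bisectLeft arr t) arr).countP (fun y => decide (t ≤ y)) = 0 := by
    rw [List.countP_eq_zero]
    intro y hy
    rw [List.mem_iff_getElem] at hy
    obtain ⟨j, hj, rfl⟩ := hy
    have hj' : j < arr.length := by simp at hj; omega
    rw [List.getElem_take]
    simpa using not_le.mpr (hlt j hj' (by simp at hj; omega))
  have h2 : (List.drop (PySem.List.bisectLeft arr t) arr).countP (fun y => decide (t ≤ y))
      = (List.drop (PySem.List.bisectLeft arr t) arr).length := by
    rw [List.countP_eq_length]
    intro y hy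
    rw [List.mem_iff_getElem] at hy
    obtain ⟨j, hj, rfl⟩ := hy
    rw [List.getElem_drop]
    simpa using hge _ _ (by omega)
  rw [h1, h2, List.length_drop]; omega

lemma pvBl_mono (arr : List Int) (hs : arr.Pairwise (· ≤ ·)) {t t' : Int} (h : t' ≤ t) :
    PySem.List.bisectLeft arr t' ≤ PySem.List.bisectLeft arr t := by
  obtain ⟨hle, hlt, hge⟩ := PySem.List.bisectLeft_spec arr t hs
  obtain ⟨hle', hlt', hge'⟩ := PySem.List.bisectLeft_spec arr t' hs
  by_contra hc
  push_neg at hc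
  have hj : PySem.List.bisectLeft arr t < arr.length := lt_of_lt_of_le hc hle'
  have a1 := hlt' _ hj hc
  have a2 := hge _ hj (le_refl _)
  omega

lemma pvAWhile_eq (arr : List Int) (k ai : Int) (hs : arr.Pairwise (· ≤ ·)) (j : Int)
    (h1 : (PySem.List.bisectLeft arr (k - ai) : Int) - 1 ≤ j) (h2 : j < arr.length) :
    pvAWhile arr k ai j = (PySem.List.bisectLeft arr (k - ai) : Int) - 1 := by
  obtain ⟨hle, hlt, hge⟩ := PySem.List.bisectLeft_spec arr (k - ai) hs
  revert h1 h2
  induction j using pvAWhile.induct arr k ai with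
  | case1 j h ih =>
    intro h1 h2
    have hjn : j.toNat < arr.length := by omega
    have hget : PySem.List.pyGetD arr j 0 = arr[j.toNat] := by
      conv_lhs => rw [show j = ((j.toNat : Nat) : Int) from by omega]
      rw [PySem.List.pyGetD_natCast]
      exact List.getD_eq_getElem _ _ hjn
    have hc : PySem.List.bisectLeft arr (k - ai) ≤ j.toNat := by
      by_contra hcc
      push_neg at hcc
      have := hlt _ hjn hcc
      rw [hget] at h
      omega
    rw [pvAWhile, dif_pos h]
    exact ih (by omega) (by omega)
  | case2 j h =>
    intro h1 h2
    rw [pvAWhile, dif_neg h]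
    rcases le_or_gt 0 j with hj0 | hj0
    · have hjn : j.toNat < arr.length := by omega
      have hget : PySem.List.pyGetD arr j 0 = arr[j.toNat] := by
        conv_lhs => rw [show j = ((j.toNat : Nat) : Int) from by omega]
        rw [PySem.List.pyGetD_natCast]
        exact List.getD_eq_getElem _ _ hjn
      have hlt2 : j.toNat < PySem.List.bisectLeft arr (k - ai) := by
        by_contra hcc
        push_neg at hcc
        have := hge _ hjn hcc
        rw [not_and_or] at h
        rcases h with h | h
        · omega
        · rw [hget] at h; omega
      omega
    · omega

def pvB (n c i : Nat) : Int :=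
  if (c : Int) - 1 < (i : Int) then 1 + ((n : Int) - i - 1) * 2
  else if (c : Int) - 1 = (i : Int) then ((n : Int) - i - 1) * 2
  else ((n : Int) - 1 - ((c : Int) - 1)) * 2

def pvC (arr : List Int) (k : Int) (i : Nat) : Nat :=
  PySem.List.bisectLeft arr (k - arr.getD i 0)

lemma pvMainFold (arr : List Int) (k : Int) (hs : arr.Pairwise (· ≤ ·)) (m : Nat)
    (hm : m ≤ arr.length) :
    ((List.map (fun i : Nat => (i : Int)) (List.range m)).foldl
      (pvStep arr k (arr.length : Int)) (0, (arr.length : Int) - 1))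
    = (∑ i ∈ Finset.range m, pvB arr.length (pvC arr k i) i,
       if m = 0 then (arr.length : Int) - 1 else (pvC arr k (m - 1) : Int) - 1) := by
  induction m with
  | zero => simp
  | succ m ih =>
    have hsplit : List.map (fun i : Nat => (i : Int)) (List.range (m + 1))
        = List.map (fun i : Nat => (i : Int)) (List.range m) ++ [(m : Int)] := by
      rw [List.range_succ, List.map_append]; rfl
    rw [hsplit, List.foldl_append, ih (by omega), List.foldl_cons, List.foldl_nil]
    have hgm : PySem.List.pyGetD arr (m : Int) 0 = arr.getD m 0 := PySem.List.pyGetD_natCast arr m 0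
    have hcle : PySem.List.bisectLeft arr (k - arr.getD m 0) ≤ arr.length :=
      (PySem.List.bisectLeft_spec arr (k - arr.getD m 0) hs).1
    have hwhile : pvAWhile arr k (PySem.List.pyGetD arr (m : Int) 0)
        (if m = 0 then (arr.length : Int) - 1 else (pvC arr k (m - 1) : Int) - 1)
        = (pvC arr k m : Int) - 1 := by
      rw [hgm]
      by_cases hm0 : m = 0
      · rw [if_pos hm0]
        exact pvAWhile_eq arr k _ hs _ (by omega) (by omega)
      · rw [if_neg hm0]
        have hmono : PySem.List.bisectLeft arr (k - arr.getD m 0)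
            ≤ PySem.List.bisectLeft arr (k - arr.getD (m - 1) 0) := by
          apply pvBl_mono arr hs
          have h1 : m - 1 < arr.length := by omega
          have h2 : m < arr.length := by omega
          have hmm : arr.getD (m - 1) 0 ≤ arr.getD m 0 := by
            rw [List.getD_eq_getElem _ _ h1, List.getD_eq_getElem _ _ h2]
            exact (List.pairwise_iff_getElem.mp hs) _ _ h1 h2 (by omega)
          omega
        have hcle' : PySem.List.bisectLeft arr (k - arr.getD (m - 1) 0) ≤ arr.length :=
          (PySem.List.bisectLeft_spec arr (k - arr.getD (m - 1) 0) hs).1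
        have he : pvC arr k (m - 1) = PySem.List.bisectLeft arr (k - arr.getD (m - 1) 0) := rfl
        exact pvAWhile_eq arr k _ hs _ (by omega) (by omega)
    simp only [pvStep, hwhile]
    rw [Finset.sum_range_succ]
    simp only [Nat.add_sub_cancel, Nat.succ_ne_zero, if_false]
    split_ifs with hA hB
    · simp [pvB, hA]
    · simp [pvB, hA, hB]
    · simp [pvB, hB]
      omega

lemma pvCore (n : Nat) (c : Nat → Nat) (hle : ∀ i, i < n → c i ≤ n)
    (hsym : ∀ i j, i < n → j < n → (c i ≤ j ↔ c j ≤ i)) :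
    ∑ i ∈ Finset.range n, pvB n (c i) i = ∑ i ∈ Finset.range n, ((n : Int) - c i) := by
  set F : Nat → Nat → Int := fun i j => if c i ≤ j then 1 else 0 with hF
  have f2 : ∀ i, i < n → ∑ j ∈ Finset.Ico (i + 1) n, F i j = (n : Int) - max (i + 1) (c i) := by
    intro i hi
    rw [hF, Finset.sum_boole]
    have heq : {x ∈ Finset.Ico (i + 1) n | c i ≤ x} = Finset.Ico (max (i + 1) (c i)) n := by
      ext x; simp [Finset.mem_Ico]; try omega
    rw [heq, Nat.card_Ico]
    have := hle i hi
    omega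
  have f3 : ∀ i, i < n → pvB n (c i) i = F i i + 2 * ((n : Int) - max (i + 1) (c i)) := by
    intro i hi
    have := hle i hi
    rw [pvB, hF]
    split_ifs <;> push_cast <;> omega
  have f1 : ∀ i, i < n → ((n : Int) - c i) = ∑ j ∈ Finset.range n, F i j := by
    intro i hi
    rw [hF, Finset.sum_boole]
    have heq : {x ∈ Finset.range n | c i ≤ x} = Finset.Ico (c i) n := by
      ext x; simp [Finset.mem_filter, Finset.mem_Ico, Finset.mem_range]; omega
    rw [heq, Nat.card_Ico]
    have := hle i hi
    omega
  have tri : ∑ i ∈ Finset.range n, ∑ j ∈ Finset.range i, F i j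
      = ∑ i ∈ Finset.range n, ∑ j ∈ Finset.Ico (i + 1) n, F i j := by
    have h0 : ∑ i ∈ Finset.range n, ∑ j ∈ Finset.range i, F i j
        = ∑ i ∈ Finset.range n, ∑ j ∈ Finset.range i, F j i := by
      refine Finset.sum_congr rfl (fun i hi => Finset.sum_congr rfl (fun j hj => ?_))
      rw [Finset.mem_range] at hi hj
      simp only [hF]
      rw [if_congr (hsym i j hi (by omega)) rfl rfl]
    rw [h0]
    have hcomm := Finset.sum_Ico_Ico_comm 0 n F
    simp only [← Finset.range_eq_Ico] at hcomm
    have hL : ∑ i ∈ Finset.range n, ∑ j ∈ Finset.Ico i n, F i j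
        = (∑ i ∈ Finset.range n, F i i) + ∑ i ∈ Finset.range n, ∑ j ∈ Finset.Ico (i + 1) n, F i j := by
      rw [← Finset.sum_add_distrib]
      refine Finset.sum_congr rfl (fun i hi => ?_)
      rw [Finset.mem_range] at hi
      exact Finset.sum_eq_sum_Ico_succ_bot hi _
    have hR : ∑ j ∈ Finset.range n, ∑ i ∈ Finset.range (j + 1), F i j
        = (∑ j ∈ Finset.range n, ∑ i ∈ Finset.range j, F i j) + ∑ j ∈ Finset.range n, F j j := by
      rw [← Finset.sum_add_distrib]
      exact Finset.sum_congr rfl (fun j hj => Finset.sum_range_succ _ _)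
    rw [hL, hR] at hcomm
    have hdiag : ∑ i ∈ Finset.range n, F i i = ∑ j ∈ Finset.range n, F j j := rfl
    omega
  calc ∑ i ∈ Finset.range n, pvB n (c i) i
      = ∑ i ∈ Finset.range n, (F i i + 2 * ((n : Int) - max (i + 1) (c i))) :=
        Finset.sum_congr rfl (fun i hi => f3 i (Finset.mem_range.mp hi))
    _ = ∑ i ∈ Finset.range n, (F i i + 2 * ∑ j ∈ Finset.Ico (i + 1) n, F i j) :=
        Finset.sum_congr rfl (fun i hi => by rw [f2 i (Finset.mem_range.mp hi)])
    _ = (∑ i ∈ Finset.range n, (F i i + ∑ j ∈ Finset.Ico (i + 1) n, F i j))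
          + ∑ i ∈ Finset.range n, ∑ j ∈ Finset.Ico (i + 1) n, F i j := by
        rw [← Finset.sum_add_distrib]
        exact Finset.sum_congr rfl (fun i _ => by ring)
    _ = (∑ i ∈ Finset.range n, (F i i + ∑ j ∈ Finset.Ico (i + 1) n, F i j))
          + ∑ i ∈ Finset.range n, ∑ j ∈ Finset.range i, F i j := by rw [tri]
    _ = ∑ i ∈ Finset.range n, (∑ j ∈ Finset.range i, F i j + F i i + ∑ j ∈ Finset.Ico (i + 1) n, F i j) := by
        rw [add_comm, ← Finset.sum_add_distrib]
        exact Finset.sum_congr rfl (fun i _ => by ring)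
    _ = ∑ i ∈ Finset.range n, ∑ j ∈ Finset.range n, F i j := by
        refine Finset.sum_congr rfl (fun i hi => ?_)
        rw [Finset.mem_range] at hi
        rw [← Finset.sum_range_succ (fun j => F i j) i]
        rw [Finset.range_eq_Ico]
        exact Finset.sum_Ico_consecutive _ (by omega) (by omega)
    _ = ∑ i ∈ Finset.range n, ((n : Int) - c i) :=
        Finset.sum_congr rfl (fun i hi => (f1 i (Finset.mem_range.mp hi)).symm)

def pvSS (ps : List Int) (k : Int) : Int :=
  (ps.map (fun x => ((ps.countP (fun y => decide (k ≤ x + y))) : Int))).sum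

-- a list sum grouped by distinct values
lemma pvGroup (ps : List Int) (h : Int → Int) :
    (ps.map h).sum = ∑ c ∈ ps.toFinset, (ps.count c) • h c := by
  have := Finset.sum_multiset_map_count (ps : Multiset Int) h
  simpa using this

lemma pvBside (nums : List Int) (k : Int) :
    countExcellentPairs_20250214_alt nums k = pvSS ((PySem.List.dedup nums).map pvPc) k := by
  set ps := (PySem.List.dedup nums).map pvPc with hps
  have hfreq : (PySem.List.dedup nums).foldl
      (fun (d : PySem.Dict Int Int) v => d.insert (pvPc v) (d.getD (pvPc v) 0 + 1))
      PySem.Dict.empty = PySem.Dict.counter ps := by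
    rw [hps, ← List.foldl_map (f := pvPc)
      (g := fun (d : PySem.Dict Int Int) x => d.insert x (d.getD x 0 + 1)),
      PySem.Dict.foldl_insert_getD_add_one_eq_counter]
  have hitems : (PySem.Dict.counter ps).items
      = (PySem.Set.ofList ps).map (fun c => (c, (ps.count c : Int))) :=
    PySem.Dict.items_counter ps
  set L := (PySem.Dict.counter ps).items with hL
  have hinner : ∀ (res : Int) (p : Int × Int),
      L.foldl (fun res q => if k ≤ p.1 + q.1 then res + p.2 * q.2 else res) res
      = res + (L.map (fun q => if k ≤ p.1 + q.1 then p.2 * q.2 else 0)).sum := by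
    intro res p
    rw [PySem.List.foldl_congr_mem L _
      (fun res q => res + (if k ≤ p.1 + q.1 then p.2 * q.2 else 0)) res
      (by intro acc q _; by_cases hc : k ≤ p.1 + q.1 <;> simp [hc])]
    exact PySem.List.foldl_add L _ res
  have houter : countExcellentPairs_20250214_alt nums k
      = (L.map (fun p => (L.map (fun q => if k ≤ p.1 + q.1 then p.2 * q.2 else 0)).sum)).sum := by
    simp only [countExcellentPairs_20250214_alt]
    rw [hfreq, ← hL]
    rw [PySem.List.foldl_congr_mem L _
      (fun res p => res + (L.map (fun q => if k ≤ p.1 + q.1 then p.2 * q.2 else 0)).sum) 0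
      (fun acc p _ => hinner acc p)]
    rw [PySem.List.foldl_add L _ 0, zero_add]
  have hT : ∀ f : Int → Int, ((PySem.Set.ofList ps).map f).sum = ∑ c ∈ ps.toFinset, f c := by
    intro f
    rw [← List.sum_toFinset f (PySem.Set.nodup_ofList ps)]
    congr 1
    ext c
    simp [List.mem_toFinset, PySem.Set.mem_ofList]
  have hcount : ∀ x : Int, ((ps.countP (fun y => decide (k ≤ x + y))) : Int)
      = ∑ c2 ∈ ps.toFinset, (ps.count c2) • (if k ≤ x + c2 then (1 : Int) else 0) := by
    intro x
    rw [← PySem.List.sum_map_ite_one_zero (fun y => decide (k ≤ x + y)) ps]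
    have := pvGroup ps (fun y => if k ≤ x + y then (1 : Int) else 0)
    simpa using this
  rw [houter, hitems]
  simp only [List.map_map, Function.comp_def]
  rw [hT]
  have hstep : ∀ c1 : Int,
      ((PySem.Set.ofList ps).map (fun c2 =>
        if k ≤ c1 + c2 then (ps.count c1 : Int) * (ps.count c2) else 0)).sum
      = ∑ c2 ∈ ps.toFinset, (if k ≤ c1 + c2 then (ps.count c1 : Int) * (ps.count c2) else 0) :=
    fun c1 => hT _
  rw [Finset.sum_congr rfl (fun c1 _ => hstep c1)]
  rw [pvSS, pvGroup]
  refine (Finset.sum_congr rfl (fun c1 _ => ?_)).symm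
  rw [hcount c1, Finset.smul_sum]
  refine Finset.sum_congr rfl (fun c2 _ => ?_)
  by_cases hc : k ≤ c1 + c2 <;> simp [hc, nsmul_eq_mul]

lemma pvMapSum (l : List Int) (f : Int → Int) :
    (l.map f).sum = ∑ i ∈ Finset.range l.length, f (l.getD i 0) := by
  induction l with
  | nil => simp
  | cons x t ih =>
    rw [List.map_cons, List.sum_cons, ih, List.length_cons, Finset.sum_range_succ']
    simp [List.getD]
    ring

lemma pvAside (nums : List Int) (k : Int) :
    countExcellentPairs_20250214 nums k = pvSS ((PySem.List.dedup nums).map pvPc) k := by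
  simp only [countExcellentPairs_20250214, PySem.Dict.keys_counter, PySem.List.dedup_eq_ofList]
  set ks := PySem.Set.ofList nums with hks
  set ps : List Int := ks.map pvPc with hps
  have hfold : ks.foldl (fun a n => pvInsort a (pvPc n)) []
      = ps.foldl (fun a x => pvInsort a x) [] := by
    rw [hps, List.foldl_map]
  rw [hfold]
  set arr := ps.foldl (fun a x => pvInsort a x) [] with harr
  obtain ⟨hs, hp⟩ := pvInsortFold ps [] (List.Pairwise.nil)
  rw [← harr] at hs hp
  simp only [List.nil_append] at hp
  have hlen : ks.length = arr.length := by
    rw [hp.length_eq, hps, List.length_map]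
  have hcast : (ks.length : Int) = (arr.length : Int) := by rw [hlen]
  simp only [hcast]
  rw [PySem.List.pyRange_zero_natCast, pvMainFold arr k hs arr.length (le_refl _)]
  simp only []
  set n := arr.length with hn
  -- characterization of pvC
  have hchar : ∀ i j, i < n → j < n →
      (pvC arr k i ≤ j ↔ k ≤ arr.getD i 0 + arr.getD j 0) := by
    intro i j hi hj
    obtain ⟨hle, hlt, hge⟩ := PySem.List.bisectLeft_spec arr (k - arr.getD i 0) hs
    rw [List.getD_eq_getElem _ _ hj]
    constructor
    · intro h
      have := hge j hj h
      omega
    · intro h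
      by_contra hcc
      push_neg at hcc
      have := hlt j hj hcc
      omega
  have hle' : ∀ i, i < n → pvC arr k i ≤ n :=
    fun i hi => (PySem.List.bisectLeft_spec arr (k - arr.getD i 0) hs).1
  have hsym : ∀ i j, i < n → j < n → (pvC arr k i ≤ j ↔ pvC arr k j ≤ i) := by
    intro i j hi hj
    rw [hchar i j hi hj, hchar j i hj hi]
    omega
  rw [pvCore n (fun i => pvC arr k i) hle' hsym]
  -- now: ∑ i < n, (n - pvC i) = pvSS ps k
  have hperm1 : ∀ p : Int → Bool, ps.countP p = arr.countP p := fun p => (hp.countP_eq p).symm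
  have hmapsum : ∀ f : Int → Int, (ps.map f).sum = (arr.map f).sum :=
    fun f => ((hp.map f).sum_eq).symm
  rw [pvSS]
  have h1 : (ps.map (fun x => ((ps.countP (fun y => decide (k ≤ x + y))) : Int))).sum
      = (arr.map (fun x => ((arr.countP (fun y => decide (k ≤ x + y))) : Int))).sum := by
    rw [show (fun x => ((ps.countP (fun y => decide (k ≤ x + y))) : Int))
        = (fun x => ((arr.countP (fun y => decide (k ≤ x + y))) : Int)) from
      funext (fun x => by rw [hperm1])]
    exact hmapsum _
  rw [h1]
  have h2 : (arr.map (fun x => ((arr.countP (fun y => decide (k ≤ x + y))) : Int))).sum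
      = ∑ i ∈ Finset.range n, ((arr.countP (fun y => decide (k ≤ arr.getD i 0 + y))) : Int) :=
    pvMapSum arr _
  rw [h2]
  refine Finset.sum_congr rfl (fun i hi => ?_)
  rw [Finset.mem_range] at hi
  have h3 : arr.countP (fun y => decide (k ≤ arr.getD i 0 + y))
      = arr.countP (fun y => decide ((k - arr.getD i 0) ≤ y)) := by
    refine List.countP_congr (fun y _ => ?_)
    simp only [decide_eq_true_eq]
    omega
  rw [h3, pvCountP_of_sorted arr hs (k - arr.getD i 0)]
  have := hle' i hi
  rw [pvC] at this ⊢
  omega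

-- ===== VERDICT (by name: the statement is the Claim_ definition above) =====
theorem countExcellentPairs_20250214_spec : Claim_equal_countExcellentPairs_20250214 := by
  intro nums k _
  show countExcellentPairs_20250214 nums k = countExcellentPairs_20250214_alt nums k
  rw [pvAside, pvBside]
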